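-- pv_equiv track=rewrite | github.com/vietdai-bk/render_weaver_jacquard | add_pattern.py | generate_multi_caro
-- ===== SOURCE A (Python) =====
-- def generate_multi_caro(height=80, width=120, block_size=10, colors=[0, 1, 2, 3]):
--     matrix = []
--     num_colors = len(colors)
--
--     for r in range(height):
--         row = []
--         for c in range(width):
--             block_r = r // block_size
--             block_c = c // block_size
--
--             color_index = (block_r + block_c) % num_colors
--
--             row.append(colors[color_index])
--         matrix.append(row)
--
--     return matrix
-- ===== SOURCE B (Python) =====
-- def generate_multi_caro(height=80, width=120, block_size=10, colors=[0, 1, 2, 3]):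
--     if height <= 0:
--         return []
--     if width <= 0:
--         return [[] for _ in range(height)]
--     n = len(colors)
--     colb = [(c // block_size) % n for c in range(width)]
--     cache = {}
--     matrix = []
--     for r in range(height):
--         s = (r // block_size) % n
--         t = cache.get(s)
--         if t is None:
--             t = [colors[(s + cb) % n] for cb in colb]
--             cache[s] = t
--         matrix.append(list(t))
--     return matrix
-- ===== Notes on version B (the rewrite author's own statement) =====
-- stated objective: alternative
-- what changed: Instead of computing colors[(r//bs + c//bs) % n] per cell in nested loops, B precomputes the column block residues and the n distinct row templates once, then builds the matrix by copying the template selected by each row's block residue.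
import Mathlib
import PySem

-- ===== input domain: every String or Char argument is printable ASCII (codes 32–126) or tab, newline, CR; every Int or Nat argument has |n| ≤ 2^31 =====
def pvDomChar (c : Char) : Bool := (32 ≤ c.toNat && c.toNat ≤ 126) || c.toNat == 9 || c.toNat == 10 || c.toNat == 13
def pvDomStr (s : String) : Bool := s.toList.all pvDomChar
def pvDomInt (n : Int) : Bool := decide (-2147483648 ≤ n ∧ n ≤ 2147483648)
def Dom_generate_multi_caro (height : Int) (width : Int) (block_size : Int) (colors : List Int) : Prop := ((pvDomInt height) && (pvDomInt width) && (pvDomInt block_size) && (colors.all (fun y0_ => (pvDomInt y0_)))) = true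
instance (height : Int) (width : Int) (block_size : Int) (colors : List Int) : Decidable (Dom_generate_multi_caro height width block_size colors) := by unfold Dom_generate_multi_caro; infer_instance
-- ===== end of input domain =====

-- B replaces A's per-cell modular arithmetic by precomputed column block residues plus a
-- per-block-residue row-template cache, copying a template per output row (different decomposition).

-- ===== PORT A =====
def generate_multi_caro (height : Int) (width : Int) (block_size : Int) (colors : List Int) : List (List Int) :=
  let num_colors : Int := colors.length
  (PySem.List.pyRange 0 height 1).foldl (fun matrix r =>
    matrix ++ [ (PySem.List.pyRange 0 width 1).foldl (fun row c =>
      row ++ [ PySem.List.pyGetD colors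
                 (PySem.Int.mod (PySem.Int.floordiv r block_size + PySem.Int.floordiv c block_size) num_colors) 0 ]) [] ]) []

-- ===== PORT B =====
def generate_multi_caro_alt (height : Int) (width : Int) (block_size : Int) (colors : List Int) : List (List Int) :=
  if height ≤ 0 then []
  else if width ≤ 0 then (PySem.List.pyRange 0 height 1).map (fun _ => ([] : List Int))
  else
    let n : Int := colors.length
    let colb : List Int := (PySem.List.pyRange 0 width 1).map (fun c => PySem.Int.mod (PySem.Int.floordiv c block_size) n)
    let res := (PySem.List.pyRange 0 height 1).foldl
      (fun (acc : List (List Int) × PySem.Dict Int (List Int)) r =>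
        let s := PySem.Int.mod (PySem.Int.floordiv r block_size) n
        match acc.2.get? s with
        | some t => (acc.1 ++ [t], acc.2)
        | none =>
          let t := colb.map (fun cb => PySem.List.pyGetD colors (PySem.Int.mod (s + cb) n) 0)
          (acc.1 ++ [t], acc.2.insert s t))
      ([], PySem.Dict.empty)
    res.1

-- ===== PRECONDITION & SPEC =====
-- A raises ZeroDivisionError exactly when height > 0 and width > 0 and (block_size = 0 or colors = []).
def Pre_generate_multi_caro (height : Int) (width : Int) (block_size : Int) (colors : List Int) : Prop :=
  height ≤ 0 ∨ width ≤ 0 ∨ (block_size ≠ 0 ∧ colors ≠ [])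
instance (height : Int) (width : Int) (block_size : Int) (colors : List Int) : Decidable (Pre_generate_multi_caro height width block_size colors) := by unfold Pre_generate_multi_caro; infer_instance
def pvWitness_generate_multi_caro : Int × Int × Int × List Int := (4, 5, 2, [0, 1, 2])

def Spec_generate_multi_caro (height : Int) (width : Int) (block_size : Int) (colors : List Int) (out : List (List Int)) : Prop := out = generate_multi_caro_alt height width block_size colors
instance (height : Int) (width : Int) (block_size : Int) (colors : List Int) (out : List (List Int)) : Decidable (Spec_generate_multi_caro height width block_size colors out) := by unfold Spec_generate_multi_caro; infer_instance

-- ===== CLAIM (what is proved, stated in full; the proofs are below) =====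
def Claim_equal_generate_multi_caro : Prop := ∀ (height : Int) (width : Int) (block_size : Int) (colors : List Int), Dom_generate_multi_caro height width block_size colors → Pre_generate_multi_caro height width block_size colors → Spec_generate_multi_caro height width block_size colors (generate_multi_caro height width block_size colors)

-- ===== LEMMAS AND PROOFS =====

-- A's inner loop for row r equals B's row template for residue (r // block_size) % n, when n = colors.length > 0.
theorem pv_row_eq (width block_size : Int) (colors : List Int) (hn : 0 < (colors.length : Int)) (r : Int) :
    (PySem.List.pyRange 0 width 1).foldl (fun row c =>
      row ++ [ PySem.List.pyGetD colors
                 (PySem.Int.mod (PySem.Int.floordiv r block_size + PySem.Int.floordiv c block_size) (colors.length : Int)) 0 ]) []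
    = ((PySem.List.pyRange 0 width 1).map (fun c => PySem.Int.mod (PySem.Int.floordiv c block_size) (colors.length : Int))).map
        (fun cb => PySem.List.pyGetD colors
          (PySem.Int.mod (PySem.Int.mod (PySem.Int.floordiv r block_size) (colors.length : Int) + cb) (colors.length : Int)) 0) := by
  rw [PySem.List.foldl_append_singleton_eq_map, List.map_map]
  apply List.map_congr_left
  intro c _
  simp only [Function.comp]
  congr 1
  simp only [PySem.Int.mod_eq_emod_of_pos hn]
  exact Int.add_emod _ _ _

-- B's cached fold: if every cache entry is its template, the fold appends one template per row
-- and the invariant is preserved.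
theorem pv_fold_spec (block_size n : Int) (colors colb : List Int)
    (rs : List Int) (acc : List (List Int) × PySem.Dict Int (List Int))
    (hinv : ∀ s t, acc.2.get? s = some t →
        t = colb.map (fun cb => PySem.List.pyGetD colors (PySem.Int.mod (s + cb) n) 0)) :
    (rs.foldl (fun (acc : List (List Int) × PySem.Dict Int (List Int)) r =>
        let s := PySem.Int.mod (PySem.Int.floordiv r block_size) n
        match acc.2.get? s with
        | some t => (acc.1 ++ [t], acc.2)
        | none =>
          let t := colb.map (fun cb => PySem.List.pyGetD colors (PySem.Int.mod (s + cb) n) 0)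
          (acc.1 ++ [t], acc.2.insert s t)) acc).1
    = acc.1 ++ rs.map (fun r => colb.map (fun cb =>
        PySem.List.pyGetD colors
          (PySem.Int.mod (PySem.Int.mod (PySem.Int.floordiv r block_size) n + cb) n) 0)) := by
  induction rs generalizing acc with
  | nil => simp
  | cons r rs ih =>
    simp only [List.foldl_cons, List.map_cons]
    cases hget : acc.2.get? (PySem.Int.mod (PySem.Int.floordiv r block_size) n) with
    | some t =>
      rw [ih (acc.1 ++ [t], acc.2) hinv, hinv _ _ hget, List.append_assoc, List.singleton_append]
    | none =>
      rw [ih _ ?_, List.append_assoc, List.singleton_append]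
      intro s' t' hget'
      rw [PySem.Dict.get?_insert] at hget'
      split at hget'
      · subst ‹s' = _›; exact (Option.some.injEq _ _ ▸ hget').symm
      · exact hinv _ _ hget'

-- ===== VERDICT (by name: the statement is the Claim_ definition above) =====
theorem generate_multi_caro_spec : Claim_equal_generate_multi_caro := by
  intro height width block_size colors _ hpre
  unfold Spec_generate_multi_caro generate_multi_caro generate_multi_caro_alt
  by_cases hh : height ≤ 0
  · simp [hh, PySem.List.pyRange_one_eq_nil hh]
  · by_cases hw : width ≤ 0
    · simp [hh, hw, PySem.List.pyRange_one_eq_nil hw]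
    · simp only [hh, hw, if_false]
      obtain ⟨hbs, hc⟩ := hpre.resolve_left hh |>.resolve_left hw
      have hn : 0 < (colors.length : Int) := by
        have : colors.length ≠ 0 := by simpa using fun h => hc (List.eq_nil_of_length_eq_zero h)
        omega
      rw [PySem.List.foldl_append_singleton_eq_map,
          pv_fold_spec block_size (colors.length : Int) colors _ _ _
            (by intro s t h; simp [PySem.Dict.get?_empty] at h)]
      simp only [List.nil_append]
      exact List.map_congr_left fun r _ => pv_row_eq width block_size colors hn r
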